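-- pv_equiv track=rewrite | github.com/pass-culture/pass-culture-main | scripts/seed/05-seed_bookings.py | calculate_shard_range
-- ===== SOURCE A (Python) =====
-- def calculate_shard_range(
--     total_count: int, shard_index: int, total_shards: int
-- ) -> tuple[int, int]:
--     """Calculate the start and end indices for a given shard."""
--     base_size = total_count // total_shards
--     remainder = total_count % total_shards
--     start = 0
--     for i in range(1, shard_index):
--         start += base_size + (1 if i <= remainder else 0)
--     shard_size = base_size + (1 if shard_index <= remainder else 0)
--     end = start + shard_size
--     return start, end
-- ===== SOURCE B (Python) =====
-- def _cumulative(q, r, j):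
--     """Total size of the first j shards, in closed form (j may be <= 0)."""
--     if j <= 0:
--         return 0
--     extra = j if j <= r else (r if r > 0 else 0)
--     return q * j + extra
--
--
-- def calculate_shard_range(
--     total_count: int, shard_index: int, total_shards: int
-- ) -> tuple[int, int]:
--     """O(1): start is the cumulative size of the preceding shards, computed in closed form."""
--     q, r = divmod(total_count, total_shards)
--     start = _cumulative(q, r, shard_index - 1)
--     return start, start + q + (1 if shard_index <= r else 0)
-- ===== Notes on version B (the rewrite author's own statement) =====
-- stated objective: faster
-- what changed: replaces the O(shard_index) loop summing per-shard sizes with a closed-form cumulative-size helper (q*j plus the clamped remainder share), computed from a single divmod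
import Mathlib
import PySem

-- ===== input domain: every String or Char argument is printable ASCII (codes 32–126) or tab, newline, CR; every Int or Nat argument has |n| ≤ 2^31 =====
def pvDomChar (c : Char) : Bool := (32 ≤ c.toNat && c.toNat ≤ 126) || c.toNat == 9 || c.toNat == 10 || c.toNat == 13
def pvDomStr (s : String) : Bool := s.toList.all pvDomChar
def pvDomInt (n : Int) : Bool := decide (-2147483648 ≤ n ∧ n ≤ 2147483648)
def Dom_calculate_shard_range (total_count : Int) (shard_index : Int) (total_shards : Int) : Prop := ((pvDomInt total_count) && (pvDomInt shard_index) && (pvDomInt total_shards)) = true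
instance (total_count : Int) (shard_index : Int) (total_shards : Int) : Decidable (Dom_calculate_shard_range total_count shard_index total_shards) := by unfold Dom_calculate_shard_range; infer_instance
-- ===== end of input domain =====

-- B computes the start index as a closed-form cumulative shard size (from one divmod) instead of A's O(shard_index) loop; equal return values proved for total_shards ≠ 0.

-- ===== PORT A =====
def calculate_shard_range (total_count : Int) (shard_index : Int) (total_shards : Int) : List Int :=
  let base_size := PySem.Int.floordiv total_count total_shards
  let remainder := PySem.Int.mod total_count total_shards
  let start := (PySem.List.pyRange 1 shard_index 1).foldl
    (fun s i => s + base_size + (if i ≤ remainder then 1 else 0)) 0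
  let shard_size := base_size + (if shard_index ≤ remainder then 1 else 0)
  [start, start + shard_size]

-- ===== PORT B =====
-- total size of the first j shards, closed form (Source B's _cumulative)
def pvCumulative (q r j : Int) : Int :=
  if j ≤ 0 then 0
  else q * j + (if j ≤ r then j else if 0 < r then r else 0)

def calculate_shard_range_alt (total_count : Int) (shard_index : Int) (total_shards : Int) : List Int :=
  match PySem.Int.divmod? total_count total_shards with
  | none => []   -- divmod raises in Python (total_shards = 0); outside Pre_
  | some (q, r) =>
    let start := pvCumulative q r (shard_index - 1)
    [start, start + q + (if shard_index ≤ r then 1 else 0)]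

-- ===== PRECONDITION & SPEC =====
-- Python A raises ZeroDivisionError when total_shards == 0; Pre_ excludes exactly that.
def Pre_calculate_shard_range (total_count : Int) (shard_index : Int) (total_shards : Int) : Prop := total_shards ≠ 0
instance (total_count : Int) (shard_index : Int) (total_shards : Int) : Decidable (Pre_calculate_shard_range total_count shard_index total_shards) := by unfold Pre_calculate_shard_range; infer_instance
def pvWitness_calculate_shard_range : Int × Int × Int := (10, 2, 3)

def Spec_calculate_shard_range (total_count : Int) (shard_index : Int) (total_shards : Int) (out : List Int) : Prop := out = calculate_shard_range_alt total_count shard_index total_shards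
instance (total_count : Int) (shard_index : Int) (total_shards : Int) (out : List Int) : Decidable (Spec_calculate_shard_range total_count shard_index total_shards out) := by unfold Spec_calculate_shard_range; infer_instance

-- ===== CLAIM (what is proved, stated in full; the proofs are below) =====
def Claim_equal_calculate_shard_range : Prop := ∀ (total_count : Int) (shard_index : Int) (total_shards : Int), Dom_calculate_shard_range total_count shard_index total_shards → Pre_calculate_shard_range total_count shard_index total_shards → Spec_calculate_shard_range total_count shard_index total_shards (calculate_shard_range total_count shard_index total_shards)

-- ===== LEMMAS AND PROOFS =====

-- A's loop over range(a, a+n) in closed form.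
lemma foldl_shard (base rem : Int) (n : Nat) : ∀ (a s : Int),
    (PySem.List.pyRange a (a + n) 1).foldl
      (fun s i => s + base + (if i ≤ rem then 1 else 0)) s
    = s + base * n + max 0 (min (n : Int) (rem - a + 1)) := by
  induction n with
  | zero =>
    intro a s
    rw [PySem.List.pyRange_one_eq_nil (by omega)]
    simp only [List.foldl_nil, Nat.cast_zero, mul_zero]
    omega
  | succ m ih =>
    intro a s
    rw [PySem.List.pyRange_one_cons (by omega), List.foldl_cons]
    have h2 : a + ((m + 1 : Nat) : Int) = (a + 1) + (m : Nat) := by push_cast; ring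
    rw [h2, ih (a + 1)]
    push_cast
    have hb : base * ((m : Int) + 1) = base * (m : Int) + base := by ring
    rw [hb]
    split_ifs <;> omega

lemma cum_eq (q r n : Int) (hn : 0 ≤ n) :
    q * n + max 0 (min n r) = pvCumulative q r n := by
  unfold pvCumulative
  rcases eq_or_lt_of_le hn with h0 | h0
  · rw [← h0]; simp
  · rw [if_neg (by omega)]
    split_ifs <;> omega

theorem calculate_shard_range_spec : Claim_equal_calculate_shard_range := by
  intro tc si ts _ hts
  have hts' : ts ≠ 0 := hts
  unfold Spec_calculate_shard_range calculate_shard_range calculate_shard_range_alt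
  have hd : PySem.Int.divmod? tc ts
      = some (PySem.Int.floordiv tc ts, PySem.Int.mod tc ts) := by
    simp [PySem.Int.divmod?, PySem.Int.floordiv, PySem.Int.mod, hts']
  rw [hd]
  simp only
  by_cases h : 1 ≤ si
  · have hsi : si = 1 + ((si - 1).toNat : Int) := by omega
    rw [show PySem.List.pyRange 1 si 1 = PySem.List.pyRange 1 (1 + ((si - 1).toNat : Int)) 1 by rw [← hsi]]
    rw [foldl_shard _ _ _ 1 0]
    have hn : ((si - 1).toNat : Int) = si - 1 := by omega
    rw [hn]
    have hrem : PySem.Int.mod tc ts - 1 + 1 = PySem.Int.mod tc ts := by ring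
    rw [hrem, zero_add, cum_eq _ _ _ (by omega)]
    simp only [List.cons.injEq, and_true, true_and]
    split_ifs <;> omega
  · rw [PySem.List.pyRange_one_eq_nil (by omega)]
    simp only [List.foldl_nil]
    rw [show pvCumulative (PySem.Int.floordiv tc ts) (PySem.Int.mod tc ts) (si - 1) = 0 from by
      unfold pvCumulative; rw [if_pos (by omega)]]
    simp only [List.cons.injEq, and_true, true_and]
    split_ifs <;> omega
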